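-- pv_equiv track=rewrite | github.com/similar207/programmers_coding_practice | 영어 끝말잇기.py | solution
-- ===== SOURCE A (Python) =====
-- def solution(n, words):
--     answer = [0,0]
--     a = 1 #순서
--     w = words[0][0] #끝 단어
--     w1 = [] #말한 단어
--     c = 1
--     for i in words:
--
--         if w != i[0]:
--             return [a, c]
--         w = i[-1]
--         if i in w1:
--             return [a, c]
--         else:
--             w1.append(i)
--         a += 1
--         if a > n:
--             a -= n
--             c += 1
--
--
--     return answer
-- ===== SOURCE B (Python) =====
-- def solution(n, words):
--     total = len(words)
--     # first index whose word was already said (no character access needed)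
--     seen = set()
--     dup = total
--     for i, w in enumerate(words):
--         if w in seen:
--             dup = i
--             break
--         seen.add(w)
--     # first chain break; only positions up to the duplicate can matter
--     prefix = words[:min(dup + 1, total)]
--     idx = dup
--     for i, (prv, cur) in enumerate(zip(prefix, prefix[1:]), 1):
--         if cur[0] != prv[-1]:
--             idx = i
--             break
--     if idx == total:
--         return [0, 0]
--     return [idx % n + 1, idx // n + 1]
-- ===== Notes on version B (the rewrite author's own statement) =====
-- stated objective: alternative
-- what changed: A interleaves chain-check, duplicate-check and a running (player, round) counter pair in one stateful loop over a linear membership list; B first finds the first repeated-word index with a hash set, then scans only the prefix up to that index for the first chain break, and converts the winning index to [player, round] with divmod.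
-- outside the precondition, e.g. on solution(0, ['aa', 'bb']): A returns [2, 2], B raises ZeroDivisionError; on solution(-1, ['ab', 'ba', 'cc']): A returns [5, 3], B returns [1, -1]
import Mathlib
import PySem

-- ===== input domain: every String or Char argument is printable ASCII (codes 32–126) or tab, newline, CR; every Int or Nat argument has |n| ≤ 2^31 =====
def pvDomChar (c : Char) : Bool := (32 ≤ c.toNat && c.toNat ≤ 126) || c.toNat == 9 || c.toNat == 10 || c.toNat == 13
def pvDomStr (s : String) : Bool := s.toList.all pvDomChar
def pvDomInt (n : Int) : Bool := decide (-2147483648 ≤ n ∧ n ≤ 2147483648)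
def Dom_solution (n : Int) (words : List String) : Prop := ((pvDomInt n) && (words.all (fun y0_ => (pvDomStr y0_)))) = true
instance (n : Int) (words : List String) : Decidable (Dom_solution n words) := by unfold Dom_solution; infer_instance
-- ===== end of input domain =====

-- B replaces A's single stateful loop (running player/round counters, linear membership list) by a
-- set-based first-duplicate scan followed by a chain-break scan over the prefix up to that duplicate,
-- converting the winning index to [player, round] with divmod (objective: alternative decomposition).


-- ===== PORT A =====
-- the for-loop of A, state (w, w1, a, c); the `| _, _ => [a, c]` arm is where Python raises
-- IndexError on an empty word (excluded by Pre_solution)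
def solutionLoopA (n : Int) : List String → Char → List String → Int → Int → List Int
  | [], _, _, _, _ => [0, 0]
  | i :: rest, w, w1, a, c =>
    match PySem.Str.pyGet? i 0, PySem.Str.pyGet? i (-1) with
    | some h0, some l0 =>
      if w ≠ h0 then [a, c]
      else if w1.contains i then [a, c]
      else if a + 1 > n then solutionLoopA n rest l0 (w1 ++ [i]) (a + 1 - n) (c + 1)
      else solutionLoopA n rest l0 (w1 ++ [i]) (a + 1) c
    | _, _ => [a, c]

def solution (n : Int) (words : List String) : List Int :=
  match words with
  | [] => [0, 0]        -- Python raises IndexError at words[0] here (excluded by Pre_solution)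
  | w0 :: _ =>
    match PySem.Str.pyGet? w0 0 with
    | none => [0, 0]    -- Python raises IndexError at words[0][0] here (excluded by Pre_solution)
    | some ch => solutionLoopA n words ch [] 1 1

-- ===== PORT B =====
-- first index whose word was already said (set membership; never touches characters)
def dupLoopB (total : Int) : List String → PySem.Set String → Int → Int
  | [], _, _ => total
  | w :: rest, seen, i =>
    if PySem.Set.contains seen w then i
    else dupLoopB total rest (PySem.Set.add seen w) (i + 1)

-- first index i ≥ 1 in the prefix whose word does not start with the previous word's last letter;
-- the `| _, _ => dflt` arm is where Python raises IndexError on an empty word (excluded by Pre_solution)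
def brkLoopB (dflt : Int) : List (String × String) → Int → Int
  | [], _ => dflt
  | (prv, cur) :: rest, i =>
    match PySem.Str.pyGet? cur 0, PySem.Str.pyGet? prv (-1) with
    | some c0, some pl => if c0 ≠ pl then i else brkLoopB dflt rest (i + 1)
    | _, _ => dflt

def solution_alt (n : Int) (words : List String) : List Int :=
  let total : Int := words.length
  let dup := dupLoopB total words PySem.Set.empty 0
  let pfx := PySem.List.slice words none (some (min (dup + 1) total))
  let idx := brkLoopB dup (pfx.zip (PySem.List.slice pfx (some 1) none)) 1
  if idx = total then [0, 0]
  else [PySem.Int.mod idx n + 1, PySem.Int.floordiv idx n + 1]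

-- ===== PRECONDITION & SPEC =====
-- the game rule is violated at position v: words[v] does not start with the last letter of
-- words[v-1], or words[v] was already said among words[0..v-1]
def pvViolB (words : List String) (v : Nat) : Bool :=
  decide (PySem.Str.pyGet? (words.getD v "") 0 ≠ PySem.Str.pyGet? (words.getD (v - 1) "") (-1))
    || (words.take v).contains (words.getD v "")

-- Pre_ excludes (a) n ≤ 0, a degenerate player count outside the game's natural domain (A's
-- once-only `a -= n` wraparound produces counters no cyclic seating yields and B's divmod raises
-- ZeroDivisionError at n = 0; see the cites in the claim), and (b) exactly the inputs on which
-- A raises IndexError: empty `words`, or a word list with an empty-string entry that is not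
-- strictly preceded by a rule violation (A reaches the empty word and crashes on `i[0]`).
def Pre_solution (n : Int) (words : List String) : Prop :=
  1 ≤ n ∧ words ≠ [] ∧
  ∀ e, e < words.length → words.getD e "" = "" →
    ∃ v ∈ List.range e, 1 ≤ v ∧ pvViolB words v = true
instance (n : Int) (words : List String) : Decidable (Pre_solution n words) := by
  unfold Pre_solution; infer_instance

def pvWitness_solution : Int × List String := (2, ["ab", "ba"])

def Spec_solution (n : Int) (words : List String) (out : List Int) : Prop := out = solution_alt n words
instance (n : Int) (words : List String) (out : List Int) : Decidable (Spec_solution n words out) := by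
  unfold Spec_solution; infer_instance

-- ===== CLAIM (what is proved, stated in full; the proofs are below) =====
def Claim_equal_solution : Prop := ∀ (n : Int) (words : List String), Dom_solution n words → Pre_solution n words → Spec_solution n words (solution n words)

-- ===== LEMMAS AND PROOFS =====

-- proof-side invariant along the run: each word is nonempty and either violates the rule right
-- here (chain break, or already in `seen`) or the rest is safe with it added
def pvSafe : List String → String → List String → Prop
  | _, _, [] => True
  | seen, prv, k :: rest =>
    k ≠ "" ∧ (PySem.Str.pyGet? k 0 ≠ PySem.Str.pyGet? prv (-1) ∨
      seen.contains k = true ∨ pvSafe (seen ++ [k]) k rest)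

-- first violation, relative to the remaining list: index and whether it was a chain break (true)
-- or a repeated word (false); `none` also on an unreachable empty word (ruled out by pvSafe)
def pvFV : Char → List String → List String → Option (Nat × Bool)
  | _, _, [] => none
  | w, seen, i :: rest =>
    match PySem.Str.pyGet? i 0, PySem.Str.pyGet? i (-1) with
    | some h0, some l0 =>
      if w ≠ h0 then some (0, true)
      else if seen.contains i then some (0, false)
      else (pvFV l0 (seen ++ [i]) rest).map (fun p => (p.1 + 1, p.2))
    | _, _ => none

theorem str_head_last (s : String) (hs : s ≠ "") :
    ∃ h0 l0, PySem.Str.pyGet? s 0 = some h0 ∧ PySem.Str.pyGet? s (-1) = some l0 := by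
  have hl : s.toList ≠ [] := fun h => hs (String.toList_eq_nil_iff.mp h)
  have e0 : PySem.Str.pyGet? s 0 = PySem.List.pyGet? s.toList 0 := by simp [pysem]
  have e1 : PySem.Str.pyGet? s (-1) = PySem.List.pyGet? s.toList (-1) := by simp [pysem]
  rcases List.eq_nil_or_concat s.toList with h | ⟨ys, y, h⟩
  · exact absurd h hl
  · have hlast : PySem.List.pyGet? s.toList (-1) = some y := by
      rw [h, List.concat_eq_append]; exact PySem.List.pyGet?_neg_one_append_singleton ys y
    rcases hc : s.toList with _ | ⟨c, cs⟩
    · exact absurd hc hl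
    · exact ⟨c, y, by rw [e0, hc]; simp [pysem], by rw [e1, hlast]⟩

theorem shape_to_safe (words : List String)
    (hviol : ∀ e, e < words.length → words.getD e "" = "" →
      ∃ v ∈ List.range e, 1 ≤ v ∧ pvViolB words v = true) :
    ∀ (ks pre : List String) (prv : String),
      words = (pre ++ [prv]) ++ ks →
      (∀ v, 1 ≤ v → v < pre.length + 1 → pvViolB words v = false) →
      pvSafe (pre ++ [prv]) prv ks := by
  intro ks
  induction ks with
  | nil => intro pre prv _ _; trivial
  | cons k rest ih =>
    intro pre prv hw hnov
    have hgetk : words.getD (pre.length + 1) "" = k := by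
      rw [hw, List.getD_append_right (pre ++ [prv]) (k :: rest) "" (pre.length + 1)
        (by simp)]
      simp
    have hgetprv : words.getD pre.length "" = prv := by
      rw [hw, List.getD_append (pre ++ [prv]) (k :: rest) "" pre.length (by simp),
        List.getD_append_right pre [prv] "" pre.length (le_refl _)]
      simp
    have htake : words.take (pre.length + 1) = pre ++ [prv] := by
      rw [hw]
      have := List.take_left (l₁ := pre ++ [prv]) (l₂ := k :: rest)
      simpa using this
    have hlen : pre.length + 1 < words.length := by
      rw [hw]; simp
    have hk : k ≠ "" := by
      intro hke
      obtain ⟨v, hvmem, hv1, hvt⟩ := hviol (pre.length + 1) hlen (by rw [hgetk]; exact hke)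
      have hvlt := List.mem_range.mp hvmem
      rw [hnov v hv1 (by omega)] at hvt
      exact Bool.false_ne_true hvt
    refine ⟨hk, ?_⟩
    by_cases hv : pvViolB words (pre.length + 1) = true
    · unfold pvViolB at hv
      rw [Bool.or_eq_true, decide_eq_true_iff] at hv
      rcases hv with hbr | hct
      · left
        rw [hgetk] at hbr
        rw [show pre.length + 1 - 1 = pre.length from by omega, hgetprv] at hbr
        exact hbr
      · right; left
        rw [htake, hgetk] at hct
        exact hct
    · right; right
      have hw' : words = ((pre ++ [prv]) ++ [k]) ++ rest := by rw [hw]; simp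
      have hnov' : ∀ v, 1 ≤ v → v < (pre ++ [prv]).length + 1 → pvViolB words v = false := by
        intro v h1 h2
        simp only [List.length_append, List.length_cons, List.length_nil] at h2
        rcases Nat.lt_or_ge v (pre.length + 1) with h | h
        · exact hnov v h1 h
        · have hv' : v = pre.length + 1 := by omega
          subst hv'
          exact Bool.eq_false_iff.mpr hv
      have h := ih (pre ++ [prv]) k hw' hnov'
      simpa using h

theorem counter_facts (n : Int) (hn : 1 ≤ n) (t : Nat) :
    ((t : Int) % n + 1 + 1 > n →
      (t : Int) % n + 1 + 1 - n = ((t + 1 : Nat) : Int) % n + 1 ∧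
      (t : Int) / n + 1 + 1 = ((t + 1 : Nat) : Int) / n + 1) ∧
    (¬ ((t : Int) % n + 1 + 1 > n) →
      (t : Int) % n + 1 + 1 = ((t + 1 : Nat) : Int) % n + 1 ∧
      (t : Int) / n + 1 = ((t + 1 : Nat) : Int) / n + 1) := by
  have h0 : (0 : Int) < n := by omega
  have hr0 : 0 ≤ (t : Int) % n := Int.emod_nonneg _ (by omega)
  have hrn : (t : Int) % n < n := Int.emod_lt_of_pos _ h0
  have hsum : n * ((t : Int) / n) + (t : Int) % n = (t : Int) := Int.mul_ediv_add_emod _ _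
  constructor
  · intro h
    have ht1 : (t : Int) + 1 = n * ((t : Int) / n + 1) := by rw [mul_add, mul_one]; omega
    have hd : ((t : Int) + 1) / n = (t : Int) / n + 1 := by
      rw [ht1, Int.mul_ediv_cancel_left _ (by omega)]
    have hm : ((t : Int) + 1) % n = 0 := by rw [ht1, Int.mul_emod_right]
    push_cast
    omega
  · intro h
    have hd := (Int.ediv_emod_unique (a := (t : Int) + 1) (b := n)
      (q := (t : Int) / n) (r := (t : Int) % n + 1) h0).mpr ⟨by omega, by omega, by omega⟩
    push_cast
    omega

theorem loopA_eq (n : Int) (hn : 1 ≤ n) :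
    ∀ (ks : List String) (prv : String) (w : Char) (seen : List String) (t : Nat),
      PySem.Str.pyGet? prv (-1) = some w →
      pvSafe seen prv ks →
      solutionLoopA n ks w seen ((t : Int) % n + 1) ((t : Int) / n + 1) =
        match pvFV w seen ks with
        | none => [0, 0]
        | some (j, _) => [((t + j : Nat) : Int) % n + 1, ((t + j : Nat) : Int) / n + 1] := by
  intro ks
  induction ks with
  | nil => intro prv w seen t _ _; simp [solutionLoopA, pvFV]
  | cons i rest ih =>
    intro prv w seen t hprv hsafe
    obtain ⟨hk, hdisj⟩ := hsafe
    obtain ⟨h0, l0, e0, e1⟩ := str_head_last i hk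
    have hL : solutionLoopA n (i :: rest) w seen ((t : Int) % n + 1) ((t : Int) / n + 1) =
        (match PySem.Str.pyGet? i 0, PySem.Str.pyGet? i (-1) with
         | some h0', some l0' =>
           if w ≠ h0' then [(t : Int) % n + 1, (t : Int) / n + 1]
           else if seen.contains i then [(t : Int) % n + 1, (t : Int) / n + 1]
           else if (t : Int) % n + 1 + 1 > n then
             solutionLoopA n rest l0' (seen ++ [i]) ((t : Int) % n + 1 + 1 - n) ((t : Int) / n + 1 + 1)
           else solutionLoopA n rest l0' (seen ++ [i]) ((t : Int) % n + 1 + 1) ((t : Int) / n + 1)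
         | _, _ => [(t : Int) % n + 1, (t : Int) / n + 1]) := rfl
    have hR : pvFV w seen (i :: rest) =
        (match PySem.Str.pyGet? i 0, PySem.Str.pyGet? i (-1) with
         | some h0', some l0' =>
           if w ≠ h0' then some ((0 : Nat), true)
           else if seen.contains i then some ((0 : Nat), false)
           else (pvFV l0' (seen ++ [i]) rest).map (fun p => (p.1 + 1, p.2))
         | _, _ => none) := rfl
    rw [e0, e1] at hL hR
    have hL' : solutionLoopA n (i :: rest) w seen ((t : Int) % n + 1) ((t : Int) / n + 1) =
        (if w ≠ h0 then [(t : Int) % n + 1, (t : Int) / n + 1]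
         else if seen.contains i then [(t : Int) % n + 1, (t : Int) / n + 1]
         else if (t : Int) % n + 1 + 1 > n then
           solutionLoopA n rest l0 (seen ++ [i]) ((t : Int) % n + 1 + 1 - n) ((t : Int) / n + 1 + 1)
         else solutionLoopA n rest l0 (seen ++ [i]) ((t : Int) % n + 1 + 1) ((t : Int) / n + 1)) := hL
    have hR' : pvFV w seen (i :: rest) =
        (if w ≠ h0 then some ((0 : Nat), true)
         else if seen.contains i then some ((0 : Nat), false)
         else (pvFV l0 (seen ++ [i]) rest).map (fun p => (p.1 + 1, p.2))) := hR
    rw [hL', hR']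
    by_cases hw : w ≠ h0
    · rw [if_pos hw, if_pos hw]; simp
    · rw [if_neg hw, if_neg hw]
      by_cases hm : seen.contains i
      · rw [if_pos hm, if_pos hm]; simp
      · rw [if_neg hm, if_neg hm]
        have hrhs : (match (pvFV l0 (seen ++ [i]) rest).map (fun p => (p.1 + 1, p.2)) with
            | none => ([0, 0] : List Int)
            | some (j, _) => [((t + j : Nat) : Int) % n + 1, ((t + j : Nat) : Int) / n + 1]) =
            match pvFV l0 (seen ++ [i]) rest with
            | none => [0, 0]
            | some (j, _) => [((t + 1 + j : Nat) : Int) % n + 1, ((t + 1 + j : Nat) : Int) / n + 1] := by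
          cases pvFV l0 (seen ++ [i]) rest with
          | none => rfl
          | some p =>
            obtain ⟨j, b⟩ := p
            show [((t + (j + 1) : Nat) : Int) % n + 1, ((t + (j + 1) : Nat) : Int) / n + 1] = _
            have he : t + (j + 1) = t + 1 + j := by omega
            rw [he]
        rw [hrhs]
        have hsafe' : pvSafe (seen ++ [i]) i rest := by
          rcases hdisj with hbr | hct | hs
          · exfalso
            rw [e0, hprv] at hbr
            exact hbr (by simpa using (not_not.mp hw).symm)
          · exact absurd hct hm
          · exact hs
        have hrec := ih i l0 (seen ++ [i]) (t + 1) e1 hsafe'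
        obtain ⟨hpos, hneg⟩ := counter_facts n hn t
        by_cases hgt : (t : Int) % n + 1 + 1 > n
        · obtain ⟨ha, hb⟩ := hpos hgt
          rw [if_pos hgt, ha, hb, hrec]
        · obtain ⟨ha, hb⟩ := hneg hgt
          rw [if_neg hgt, ha, hb, hrec]

theorem pvFV_lt_length :
    ∀ (ks : List String) (w : Char) (seen : List String) (j : Nat) (b : Bool),
      pvFV w seen ks = some (j, b) → j < ks.length := by
  intro ks
  induction ks with
  | nil => intro w seen j b h; simp [pvFV] at h
  | cons i rest ih =>
    intro w seen j b h
    simp only [List.length_cons]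
    rw [show pvFV w seen (i :: rest) =
      (match PySem.Str.pyGet? i 0, PySem.Str.pyGet? i (-1) with
       | some h0, some l0 =>
         if w ≠ h0 then some ((0 : Nat), true)
         else if seen.contains i then some ((0 : Nat), false)
         else (pvFV l0 (seen ++ [i]) rest).map (fun p => (p.1 + 1, p.2))
       | _, _ => none) from rfl] at h
    cases hg0 : PySem.Str.pyGet? i 0 with
    | none => rw [hg0] at h; cases hg1 : PySem.Str.pyGet? i (-1) <;> rw [hg1] at h <;> simp at h
    | some h0 =>
      cases hg1 : PySem.Str.pyGet? i (-1) with
      | none => rw [hg0, hg1] at h; simp at h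
      | some l0 =>
        rw [hg0, hg1] at h
        have h' : (if w ≠ h0 then some ((0 : Nat), true)
            else if seen.contains i then some ((0 : Nat), false)
            else (pvFV l0 (seen ++ [i]) rest).map (fun p => (p.1 + 1, p.2))) = some (j, b) := h
        split_ifs at h' with h1 h2
        · simp only [Option.some.injEq, Prod.mk.injEq] at h'
          omega
        · simp only [Option.some.injEq, Prod.mk.injEq] at h'
          omega
        · cases hfv : pvFV l0 (seen ++ [i]) rest with
          | none => rw [hfv] at h'; simp at h'
          | some p =>
            obtain ⟨j', b'⟩ := p
            rw [hfv] at h'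
            simp only [Option.map_some, Option.some.injEq, Prod.mk.injEq] at h'
            have := ih l0 (seen ++ [i]) j' b' hfv
            omega

-- dupLoopB either reports no duplicate (total) or an index ≥ its counter
theorem dup_range (total : Int) :
    ∀ (ks : List String) (s : PySem.Set String) (i : Int),
      dupLoopB total ks s i = total ∨ ∃ d : Nat, dupLoopB total ks s i = i + (d : Int) := by
  intro ks
  induction ks with
  | nil => intro s i; left; rfl
  | cons k rest ih =>
    intro s i
    show (if PySem.Set.contains s k then i
      else dupLoopB total rest (PySem.Set.add s k) (i + 1)) = total ∨
      ∃ d : Nat, (if PySem.Set.contains s k then i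
        else dupLoopB total rest (PySem.Set.add s k) (i + 1)) = i + (d : Int)
    split
    · right; exact ⟨0, by simp⟩
    · rcases ih (PySem.Set.add s k) (i + 1) with h | ⟨d, hd⟩
      · left; exact h
      · right; exact ⟨d + 1, by rw [hd]; push_cast; ring⟩

-- the first duplicate found by dupLoopB, against the first violation: when the violation is a
-- repeated word it is exactly that index; when it is a chain break the duplicate is not earlier
theorem dup_run (total : Int) :
    ∀ (ks : List String) (prv : String) (w : Char) (s : PySem.Set String) (i : Int),
      PySem.Str.pyGet? prv (-1) = some w →
      pvSafe s prv ks →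
      (match pvFV w s ks with
       | none => dupLoopB total ks s i = total
       | some (j, true) => dupLoopB total ks s i = total ∨
           ∃ d : Nat, j ≤ d ∧ dupLoopB total ks s i = i + (d : Int)
       | some (j, false) => dupLoopB total ks s i = i + (j : Int)) := by
  intro ks
  induction ks with
  | nil => intro prv w s i _ _; show dupLoopB total [] s i = total; rfl
  | cons k rest ih =>
    intro prv w s i hprv hsafe
    obtain ⟨hk, hdisj⟩ := hsafe
    obtain ⟨h0, l0, e0, e1⟩ := str_head_last k hk
    have hfv : pvFV w s (k :: rest) =
        (if w ≠ h0 then some ((0 : Nat), true)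
         else if s.contains k then some ((0 : Nat), false)
         else (pvFV l0 (s ++ [k]) rest).map (fun p => (p.1 + 1, p.2))) := by
      have h : pvFV w s (k :: rest) =
          (match PySem.Str.pyGet? k 0, PySem.Str.pyGet? k (-1) with
           | some h0', some l0' =>
             if w ≠ h0' then some ((0 : Nat), true)
             else if s.contains k then some ((0 : Nat), false)
             else (pvFV l0' (s ++ [k]) rest).map (fun p => (p.1 + 1, p.2))
           | _, _ => none) := rfl
      rw [e0, e1] at h
      exact h
    have hdl : dupLoopB total (k :: rest) s i =
        (if PySem.Set.contains s k then i
         else dupLoopB total rest (PySem.Set.add s k) (i + 1)) := rfl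
    rw [hfv]
    by_cases hw : w ≠ h0
    · rw [if_pos hw]
      show dupLoopB total (k :: rest) s i = total ∨
        ∃ d : Nat, 0 ≤ d ∧ dupLoopB total (k :: rest) s i = i + (d : Int)
      rcases dup_range total (k :: rest) s i with h | ⟨d, hd⟩
      · left; exact h
      · right; exact ⟨d, Nat.zero_le d, hd⟩
    · rw [if_neg hw]
      by_cases hm : s.contains k
      · rw [if_pos hm]
        show dupLoopB total (k :: rest) s i = i + ((0 : Nat) : Int)
        rw [hdl, if_pos (by simpa [PySem.Set.contains] using hm)]
        simp
      · rw [if_neg hm]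
        have hadd : PySem.Set.add s k = s ++ [k] := by
          simp only [PySem.Set.add]
          rw [if_neg (by simpa [PySem.Set.contains] using hm)]
        have hstep : dupLoopB total (k :: rest) s i = dupLoopB total rest (s ++ [k]) (i + 1) := by
          rw [hdl, if_neg (by simpa [PySem.Set.contains] using hm), hadd]
        have hsafe' : pvSafe (s ++ [k]) k rest := by
          rcases hdisj with hbr | hct | hs
          · exfalso
            rw [e0, hprv] at hbr
            exact hbr (by simpa using (not_not.mp hw).symm)
          · exact absurd hct hm
          · exact hs
        have hrec := ih k l0 (s ++ [k]) (i + 1) e1 hsafe'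
        cases hfr : pvFV l0 (s ++ [k]) rest with
        | none =>
          rw [hfr] at hrec
          show dupLoopB total (k :: rest) s i = total
          rw [hstep]
          exact hrec
        | some p =>
          obtain ⟨j', b'⟩ := p
          rw [hfr] at hrec
          cases b' with
          | true =>
            show dupLoopB total (k :: rest) s i = total ∨
              ∃ d : Nat, j' + 1 ≤ d ∧ dupLoopB total (k :: rest) s i = i + (d : Int)
            rcases hrec with h | ⟨d, hjd, hd⟩
            · left; rw [hstep]; exact h
            · right
              refine ⟨d + 1, by omega, ?_⟩
              rw [hstep, hd]
              push_cast
              ring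
          | false =>
            show dupLoopB total (k :: rest) s i = i + ((j' + 1 : Nat) : Int)
            rw [hstep, hrec]
            push_cast
            ring

-- the chain scan finds no break when there is no violation at all
theorem brk_none :
    ∀ (ks : List String) (prv : String) (w : Char) (s : List String) (t : Nat) (i dflt : Int),
      PySem.Str.pyGet? prv (-1) = some w →
      pvSafe s prv ks →
      pvFV w s ks = none →
      brkLoopB dflt ((prv :: ks.take t).zip (ks.take t)) i = dflt := by
  intro ks
  induction ks with
  | nil => intro prv w s t i dflt _ _ _; simp [brkLoopB]
  | cons k rest ih =>
    intro prv w s t i dflt hprv hsafe hfv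
    obtain ⟨hk, hdisj⟩ := hsafe
    obtain ⟨h0, l0, e0, e1⟩ := str_head_last k hk
    have hpv : pvFV w s (k :: rest) =
        (if w ≠ h0 then some ((0 : Nat), true)
         else if s.contains k then some ((0 : Nat), false)
         else (pvFV l0 (s ++ [k]) rest).map (fun p => (p.1 + 1, p.2))) := by
      have h : pvFV w s (k :: rest) =
          (match PySem.Str.pyGet? k 0, PySem.Str.pyGet? k (-1) with
           | some h0', some l0' =>
             if w ≠ h0' then some ((0 : Nat), true)
             else if s.contains k then some ((0 : Nat), false)
             else (pvFV l0' (s ++ [k]) rest).map (fun p => (p.1 + 1, p.2))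
           | _, _ => none) := rfl
      rw [e0, e1] at h
      exact h
    have hfv' : (if w ≠ h0 then some ((0 : Nat), true)
        else if s.contains k then some ((0 : Nat), false)
        else (pvFV l0 (s ++ [k]) rest).map (fun p => (p.1 + 1, p.2))) = none :=
      hpv.symm.trans hfv
    split_ifs at hfv' with h1 h2
    -- split_ifs discharges the two violation branches; hfv' is now about the tail
    have hsafe' : pvSafe (s ++ [k]) k rest := by
      rcases hdisj with hbr | hct | hs
      · exfalso
        rw [e0, hprv] at hbr
        exact hbr (by simpa using (not_not.mp h1).symm)
      · exact absurd hct h2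
      · exact hs
    cases t with
    | zero => simp [brkLoopB]
    | succ t' =>
      rw [List.take_succ_cons, List.zip_cons_cons]
      have hstep : brkLoopB dflt ((prv, k) :: (k :: rest.take t').zip (rest.take t')) i =
          (if h0 ≠ w then i
           else brkLoopB dflt ((k :: rest.take t').zip (rest.take t')) (i + 1)) := by
        have h : brkLoopB dflt ((prv, k) :: (k :: rest.take t').zip (rest.take t')) i =
            (match PySem.Str.pyGet? k 0, PySem.Str.pyGet? prv (-1) with
             | some c0, some pl => if c0 ≠ pl then i
                 else brkLoopB dflt ((k :: rest.take t').zip (rest.take t')) (i + 1)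
             | _, _ => dflt) := rfl
        rw [e0, hprv] at h
        exact h
      rw [hstep, if_neg (fun hne => hne ((not_not.mp h1).symm))]
      exact ih k l0 (s ++ [k]) t' (i + 1) dflt e1 hsafe' (by simpa using hfv')

-- the chain scan finds exactly the violation index when the first violation is a chain break
-- within the scanned prefix
theorem brk_chain :
    ∀ (ks : List String) (prv : String) (w : Char) (s : List String) (j t : Nat) (i dflt : Int),
      PySem.Str.pyGet? prv (-1) = some w →
      pvSafe s prv ks →
      pvFV w s ks = some (j, true) →
      j < t →
      brkLoopB dflt ((prv :: ks.take t).zip (ks.take t)) i = i + (j : Int) := by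
  intro ks
  induction ks with
  | nil => intro prv w s j t i dflt _ _ hfv _; simp [pvFV] at hfv
  | cons k rest ih =>
    intro prv w s j t i dflt hprv hsafe hfv hjt
    obtain ⟨hk, hdisj⟩ := hsafe
    obtain ⟨h0, l0, e0, e1⟩ := str_head_last k hk
    have hpv : pvFV w s (k :: rest) =
        (if w ≠ h0 then some ((0 : Nat), true)
         else if s.contains k then some ((0 : Nat), false)
         else (pvFV l0 (s ++ [k]) rest).map (fun p => (p.1 + 1, p.2))) := by
      have h : pvFV w s (k :: rest) =
          (match PySem.Str.pyGet? k 0, PySem.Str.pyGet? k (-1) with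
           | some h0', some l0' =>
             if w ≠ h0' then some ((0 : Nat), true)
             else if s.contains k then some ((0 : Nat), false)
             else (pvFV l0' (s ++ [k]) rest).map (fun p => (p.1 + 1, p.2))
           | _, _ => none) := rfl
      rw [e0, e1] at h
      exact h
    have hfv' : (if w ≠ h0 then some ((0 : Nat), true)
        else if s.contains k then some ((0 : Nat), false)
        else (pvFV l0 (s ++ [k]) rest).map (fun p => (p.1 + 1, p.2))) = some (j, true) :=
      hpv.symm.trans hfv
    obtain ⟨t', rfl⟩ : ∃ t', t = t' + 1 := ⟨t - 1, by omega⟩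
    rw [List.take_succ_cons, List.zip_cons_cons]
    have hstep : brkLoopB dflt ((prv, k) :: (k :: rest.take t').zip (rest.take t')) i =
        (if h0 ≠ w then i
         else brkLoopB dflt ((k :: rest.take t').zip (rest.take t')) (i + 1)) := by
      have h : brkLoopB dflt ((prv, k) :: (k :: rest.take t').zip (rest.take t')) i =
          (match PySem.Str.pyGet? k 0, PySem.Str.pyGet? prv (-1) with
           | some c0, some pl => if c0 ≠ pl then i
               else brkLoopB dflt ((k :: rest.take t').zip (rest.take t')) (i + 1)
           | _, _ => dflt) := rfl
      rw [e0, hprv] at h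
      exact h
    split_ifs at hfv' with h1 h2
    · simp only [Option.some.injEq, Prod.mk.injEq] at hfv'
      rw [hstep, if_pos (Ne.symm h1), ← hfv'.1]
      simp
    · simp at hfv'
    · cases hfr : pvFV l0 (s ++ [k]) rest with
      | none => rw [hfr] at hfv'; simp at hfv'
      | some p =>
        obtain ⟨j', b'⟩ := p
        rw [hfr] at hfv'
        simp only [Option.map_some, Option.some.injEq, Prod.mk.injEq] at hfv'
        obtain ⟨hj, hb⟩ := hfv'
        subst hb
        have hsafe' : pvSafe (s ++ [k]) k rest := by
          rcases hdisj with hbr | hct | hs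
          · exfalso
            rw [e0, hprv] at hbr
            exact hbr (by simpa using (not_not.mp h1).symm)
          · exact absurd hct h2
          · exact hs
        rw [hstep, if_neg (fun hne => hne ((not_not.mp h1).symm))]
        have hrec := ih k l0 (s ++ [k]) j' t' (i + 1) dflt e1 hsafe' hfr (by omega)
        rw [hrec, ← hj]
        push_cast
        ring

-- the chain scan finds no break when the first violation is a repeated word at or past the cutoff
theorem brk_dup :
    ∀ (ks : List String) (prv : String) (w : Char) (s : List String) (j t : Nat) (i dflt : Int),
      PySem.Str.pyGet? prv (-1) = some w →
      pvSafe s prv ks →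
      pvFV w s ks = some (j, false) →
      t ≤ j + 1 →
      brkLoopB dflt ((prv :: ks.take t).zip (ks.take t)) i = dflt := by
  intro ks
  induction ks with
  | nil => intro prv w s j t i dflt _ _ hfv _; simp [pvFV] at hfv
  | cons k rest ih =>
    intro prv w s j t i dflt hprv hsafe hfv hjt
    cases t with
    | zero => simp [brkLoopB]
    | succ t' =>
      obtain ⟨hk, hdisj⟩ := hsafe
      obtain ⟨h0, l0, e0, e1⟩ := str_head_last k hk
      have hpv : pvFV w s (k :: rest) =
          (if w ≠ h0 then some ((0 : Nat), true)
           else if s.contains k then some ((0 : Nat), false)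
           else (pvFV l0 (s ++ [k]) rest).map (fun p => (p.1 + 1, p.2))) := by
        have h : pvFV w s (k :: rest) =
            (match PySem.Str.pyGet? k 0, PySem.Str.pyGet? k (-1) with
             | some h0', some l0' =>
               if w ≠ h0' then some ((0 : Nat), true)
               else if s.contains k then some ((0 : Nat), false)
               else (pvFV l0' (s ++ [k]) rest).map (fun p => (p.1 + 1, p.2))
             | _, _ => none) := rfl
        rw [e0, e1] at h
        exact h
      have hfv' : (if w ≠ h0 then some ((0 : Nat), true)
          else if s.contains k then some ((0 : Nat), false)
          else (pvFV l0 (s ++ [k]) rest).map (fun p => (p.1 + 1, p.2))) = some (j, false) :=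
        hpv.symm.trans hfv
      rw [List.take_succ_cons, List.zip_cons_cons]
      have hstep : brkLoopB dflt ((prv, k) :: (k :: rest.take t').zip (rest.take t')) i =
          (if h0 ≠ w then i
           else brkLoopB dflt ((k :: rest.take t').zip (rest.take t')) (i + 1)) := by
        have h : brkLoopB dflt ((prv, k) :: (k :: rest.take t').zip (rest.take t')) i =
            (match PySem.Str.pyGet? k 0, PySem.Str.pyGet? prv (-1) with
             | some c0, some pl => if c0 ≠ pl then i
                 else brkLoopB dflt ((k :: rest.take t').zip (rest.take t')) (i + 1)
             | _, _ => dflt) := rfl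
        rw [e0, hprv] at h
        exact h
      split_ifs at hfv' with h1 h2
      · simp at hfv'
      · simp only [Option.some.injEq, Prod.mk.injEq] at hfv'
        have ht0 : t' = 0 := by omega
        subst ht0
        rw [hstep, if_neg (fun hne => hne ((not_not.mp h1).symm))]
        simp [brkLoopB]
      · cases hfr : pvFV l0 (s ++ [k]) rest with
        | none => rw [hfr] at hfv'; simp at hfv'
        | some p =>
          obtain ⟨j', b'⟩ := p
          rw [hfr] at hfv'
          simp only [Option.map_some, Option.some.injEq, Prod.mk.injEq] at hfv'
          obtain ⟨hj, hb⟩ := hfv'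
          subst hb
          have hsafe' : pvSafe (s ++ [k]) k rest := by
            rcases hdisj with hbr | hct | hs
            · exfalso
              rw [e0, hprv] at hbr
              exact hbr (by simpa using (not_not.mp h1).symm)
            · exact absurd hct h2
            · exact hs
          rw [hstep, if_neg (fun hne => hne ((not_not.mp h1).symm))]
          exact ih k l0 (s ++ [k]) j' t' (i + 1) dflt e1 hsafe' hfr (by omega)

-- the sliced prefix of length t+1, zipped against its own tail
theorem pfx_zip (w0 : String) (rest : List String) (m : Int) (t : Nat) (hm : m.toNat = t + 1) :
    (PySem.List.slice (w0 :: rest) none (some m)).zip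
      (PySem.List.slice (PySem.List.slice (w0 :: rest) none (some m)) (some 1) none) =
    (w0 :: rest.take t).zip (rest.take t) := by
  have h0m : 0 ≤ m := by omega
  rw [PySem.List.slice_to _ h0m, hm, List.take_succ_cons, PySem.List.slice_from_one,
    List.tail_cons]

-- B's final conversion of the violation index agrees with A's counters in normal form
theorem out_eq (n : Int) (hn : 1 ≤ n) (j : Nat) (T : Int) (hlt : 1 + (j : Int) < T) :
    (if 1 + (j : Int) = T then ([0, 0] : List Int)
     else [PySem.Int.mod (1 + (j : Int)) n + 1, PySem.Int.floordiv (1 + (j : Int)) n + 1]) =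
    [((1 + j : Nat) : Int) % n + 1, ((1 + j : Nat) : Int) / n + 1] := by
  rw [if_neg (by omega), PySem.Int.mod_eq_emod_of_pos (by omega),
    PySem.Int.floordiv_eq_ediv_of_pos (by omega)]
  have hc : ((1 + j : Nat) : Int) = 1 + (j : Int) := by push_cast; ring
  rw [hc]

-- ===== VERDICT (by name: the statement is the Claim_ definition above) =====
theorem solution_spec : Claim_equal_solution := by
  intro n words _ hpre
  obtain ⟨hn, hnil, hshape⟩ := hpre
  unfold Spec_solution
  obtain ⟨w0, rest, rfl⟩ : ∃ w0 rest, words = w0 :: rest := by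
    cases words with
    | nil => exact absurd rfl hnil
    | cons a l => exact ⟨a, l, rfl⟩
  have hw0 : w0 ≠ "" := by
    intro hke
    obtain ⟨v, hvmem, hv1, -⟩ := hshape 0 (by simp) (by simpa using hke)
    have := List.mem_range.mp hvmem
    omega
  have hsafe : pvSafe [w0] w0 rest := by
    have h := shape_to_safe (w0 :: rest) hshape rest [] w0 (by simp)
      (fun v h1 h2 => absurd h1 (by simp at h2; omega))
    simpa using h
  obtain ⟨h0, l0, e0, e1⟩ := str_head_last w0 hw0
  have hA : solution n (w0 :: rest) =
      match pvFV l0 [w0] rest with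
      | none => [0, 0]
      | some (j, _) => [((1 + j : Nat) : Int) % n + 1, ((1 + j : Nat) : Int) / n + 1] := by
    have hs0 : solution n (w0 :: rest) =
        (match PySem.Str.pyGet? w0 0 with
         | none => [0, 0]
         | some ch => solutionLoopA n (w0 :: rest) ch [] 1 1) := rfl
    rw [e0] at hs0
    have hs1 : solution n (w0 :: rest) = solutionLoopA n (w0 :: rest) h0 [] 1 1 := hs0
    have hstep : solutionLoopA n (w0 :: rest) h0 [] 1 1 =
        (if h0 ≠ h0 then [(1 : Int), 1]
         else if ([] : List String).contains w0 then [(1 : Int), 1]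
         else if (1 : Int) + 1 > n then solutionLoopA n rest l0 [w0] (1 + 1 - n) (1 + 1)
         else solutionLoopA n rest l0 [w0] (1 + 1) 1) := by
      have h : solutionLoopA n (w0 :: rest) h0 [] 1 1 =
          (match PySem.Str.pyGet? w0 0, PySem.Str.pyGet? w0 (-1) with
           | some h0', some l0' =>
             if h0 ≠ h0' then [(1 : Int), 1]
             else if ([] : List String).contains w0 then [(1 : Int), 1]
             else if (1 : Int) + 1 > n then solutionLoopA n rest l0' ([] ++ [w0]) (1 + 1 - n) (1 + 1)
             else solutionLoopA n rest l0' ([] ++ [w0]) (1 + 1) 1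
           | _, _ => [(1 : Int), 1]) := rfl
      rw [e0, e1] at h
      exact h
    rw [hs1, hstep, if_neg (show ¬(h0 ≠ h0) from by simp),
      if_neg (show ¬(([] : List String).contains w0 = true) from by simp)]
    obtain ⟨hpos, hneg⟩ := counter_facts n hn 0
    have hz : ((0 : Nat) : Int) % n = 0 := by simp
    have hz2 : ((0 : Nat) : Int) / n = 0 := by simp
    have hloop := loopA_eq n hn rest w0 l0 [w0] 1 e1 hsafe
    by_cases hgt : (1 : Int) + 1 > n
    · obtain ⟨ha, hb⟩ := hpos (by rw [hz]; simpa using hgt)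
      rw [hz] at ha; rw [hz2] at hb
      simp only [zero_add] at ha hb
      rw [if_pos hgt]
      calc solutionLoopA n rest l0 [w0] (1 + 1 - n) (1 + 1)
          = solutionLoopA n rest l0 [w0] (((1 : Nat) : Int) % n + 1) (((1 : Nat) : Int) / n + 1) := by
            rw [← ha, ← hb]
        _ = _ := by
            rw [hloop]
    · obtain ⟨ha, hb⟩ := hneg (by rw [hz]; simpa using hgt)
      rw [hz] at ha; rw [hz2] at hb
      simp only [zero_add] at ha hb
      rw [if_neg hgt]
      calc solutionLoopA n rest l0 [w0] (1 + 1) 1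
          = solutionLoopA n rest l0 [w0] (((1 : Nat) : Int) % n + 1) (((1 : Nat) : Int) / n + 1) := by
            rw [← ha, ← hb]
        _ = _ := by
            rw [hloop]
  rw [hA]
  simp only [solution_alt, List.length_cons]
  have hdup0 : dupLoopB ((rest.length + 1 : Nat) : Int) (w0 :: rest) PySem.Set.empty 0 =
      dupLoopB ((rest.length + 1 : Nat) : Int) rest [w0] 1 := by
    show (if PySem.Set.contains PySem.Set.empty w0 then (0 : Int)
      else dupLoopB ((rest.length + 1 : Nat) : Int) rest (PySem.Set.add PySem.Set.empty w0) (0 + 1)) = _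
    rw [if_neg (by simp [PySem.Set.contains, PySem.Set.empty])]
    norm_num
  rw [hdup0]
  have hdup := dup_run ((rest.length + 1 : Nat) : Int) rest w0 l0 [w0] 1 e1 hsafe
  cases hfv : pvFV l0 [w0] rest with
  | none =>
    rw [hfv] at hdup
    have hd : dupLoopB ((rest.length + 1 : Nat) : Int) rest [w0] 1
        = ((rest.length + 1 : Nat) : Int) := hdup
    rw [hd, min_eq_right (by omega :
      ((rest.length + 1 : Nat) : Int) ≤ ((rest.length + 1 : Nat) : Int) + 1)]
    rw [pfx_zip w0 rest ((rest.length + 1 : Nat) : Int) rest.length (by omega)]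
    rw [brk_none rest w0 l0 [w0] rest.length 1 ((rest.length + 1 : Nat) : Int) e1 hsafe hfv]
    rw [if_pos rfl]
  | some p =>
    obtain ⟨j, b⟩ := p
    have hj : j < rest.length := pvFV_lt_length rest l0 [w0] j b hfv
    rw [hfv] at hdup
    cases b with
    | false =>
      have hd : dupLoopB ((rest.length + 1 : Nat) : Int) rest [w0] 1 = 1 + (j : Int) := hdup
      rw [hd, min_eq_left (by push_cast; omega :
        1 + (j : Int) + 1 ≤ ((rest.length + 1 : Nat) : Int))]
      rw [pfx_zip w0 rest (1 + (j : Int) + 1) (j + 1) (by omega)]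
      rw [brk_dup rest w0 l0 [w0] j (j + 1) 1 (1 + (j : Int)) e1 hsafe hfv (le_refl _)]
      exact (out_eq n hn j ((rest.length + 1 : Nat) : Int) (by push_cast; omega)).symm
    | true =>
      have hd : dupLoopB ((rest.length + 1 : Nat) : Int) rest [w0] 1
          = ((rest.length + 1 : Nat) : Int) ∨
          ∃ d : Nat, j ≤ d ∧ dupLoopB ((rest.length + 1 : Nat) : Int) rest [w0] 1
            = 1 + (d : Int) := hdup
      rcases hd with hdT | ⟨d, hjd, hdd⟩
      · rw [hdT, min_eq_right (by omega :
          ((rest.length + 1 : Nat) : Int) ≤ ((rest.length + 1 : Nat) : Int) + 1)]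
        rw [pfx_zip w0 rest ((rest.length + 1 : Nat) : Int) rest.length (by omega)]
        rw [brk_chain rest w0 l0 [w0] j rest.length 1 ((rest.length + 1 : Nat) : Int)
          e1 hsafe hfv hj]
        exact (out_eq n hn j ((rest.length + 1 : Nat) : Int) (by push_cast; omega)).symm
      · rw [hdd]
        rcases le_total (1 + (d : Int) + 1) ((rest.length + 1 : Nat) : Int) with hle | hge
        · rw [min_eq_left hle]
          rw [pfx_zip w0 rest (1 + (d : Int) + 1) (d + 1) (by omega)]
          rw [brk_chain rest w0 l0 [w0] j (d + 1) 1 (1 + (d : Int)) e1 hsafe hfv (by omega)]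
          exact (out_eq n hn j ((rest.length + 1 : Nat) : Int) (by push_cast; omega)).symm
        · rw [min_eq_right hge]
          rw [pfx_zip w0 rest ((rest.length + 1 : Nat) : Int) rest.length (by omega)]
          rw [brk_chain rest w0 l0 [w0] j rest.length 1 (1 + (d : Int)) e1 hsafe hfv hj]
          exact (out_eq n hn j ((rest.length + 1 : Nat) : Int) (by push_cast; omega)).symm
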